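-- pv_equiv track=rewrite | github.com/sperezg6/evolutionaty_calendar_algorithm | main.py | evaluate
-- ===== SOURCE A (Python) =====
-- teams = ["Arsenal", "Brentford", "Chelsea", "Crystal Palace", "Fulham", "Tottenham Hotspur", "West Ham United",
--          "Aston Villa", "Bournemouth", "Brighton", "Burnley", "Liverpool", "Everton", "Luton Town", "Manchester City",
--          "Manchester United", "Newcastle United", "Nottingham Forrest", "Sheffield United", "Wolverhampton Wanderers"]
--
-- def evaluate(schedule,cities,distancias):
--
--     """Evalúa un calendario que asigna partidos a días."""
--     # Inicializar el score
--     score = 0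
--
--     # 1. Todos los equipos deben jugar exactamente una vez en casa y una vez fuera contra cada otro equipo
--     matches = {}
--     for team in teams:
--         matches[team] = {"home": [], "away": []}
--
--     for round_matches_dict in schedule:
--         for day, matches_for_day in round_matches_dict.items():
--             for match in matches_for_day:
--                 home, away = match
--                 matches[home]["home"].append(away)
--                 matches[away]["away"].append(home)
--
--     for team, opponents in matches.items():
--         score += abs(len(opponents["home"]) - len(opponents["away"]))  # Desequilibrio en casa/fuera
--         score += abs(len(opponents["home"]) - (len(teams) - 1) // 2)  # No se enfrenta a todos los equipos en casa
--         score += abs(len(opponents["away"]) - (len(teams) - 1) // 2)  # No se enfrenta a todos los equipos fuera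
--
--     # 2. Tratar de alternar partidos en casa y fuera
--     for i in range(1, len(schedule)):
--         for day in schedule[i]:
--             for j in range(len(schedule[i][day])):
--                 if j < len(schedule[i-1][day]) and (schedule[i][day][j][0] == schedule[i-1][day][j][0] or schedule[i][day][j][1] == schedule[i-1][day][j][1]):
--                     score += 1
--
--     # 3. En las ciudades con múltiples equipos, asegurar que en cada jornada haya un partido en esa ciudad
--     for city, city_teams in cities.items():
--         if len(city_teams) > 1:
--             for round_matches_dict in schedule:
--                 home_teams_in_city = []
--                 for day, matches_for_day in round_matches_dict.items():
--                     home_teams_in_city.extend([match[0] for match in matches_for_day if match[0] in city_teams])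
--                 if len(home_teams_in_city) < 1:  # Ningún equipo de la ciudad juega en casa
--                     score += 1
--
--     # Nuevo criterio: Equilibrio de partidos en casa/fuera a lo largo de la temporada
--     for team in teams:
--         last_home_away = None
--         consecutive_home_away = 0
--         for round_matches_dict in schedule:
--             for day, matches_for_day in round_matches_dict.items():
--                 for match in matches_for_day:
--                     if team in match:
--                         home_away = "home" if match[0] == team else "away"
--                         if last_home_away == home_away:
--                             consecutive_home_away += 1
--                             if consecutive_home_away > 2:  # Más de dos partidos consecutivos en casa/fuera
--                                 score += 1
--                         else:
--                             consecutive_home_away = 0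
--                         last_home_away = home_away
--
--     # Nuevo criterio: Equilibrio de partidos en viernes/lunes a lo largo de la temporada
--     for team in teams:
--         last_day = None
--         consecutive_days = 0
--         for round_matches_dict in schedule:
--             for day, matches_for_day in round_matches_dict.items():
--                 if day in ["Viernes", "Lunes"]:
--                     if last_day == day:
--                         consecutive_days += 1
--                         if consecutive_days > 2:  # Más de dos partidos consecutivos en viernes/lunes
--                             score += 1
--                     else:
--                         consecutive_days = 0
--                     last_day = day
--
--
--     travel_penalty = calculate_travel_distance(schedule, distancias, cities)
--
--     # Ajustar la puntuación para incluir la penalización por viaje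
--     score += travel_penalty
--
--
--
--
--     return score
--
-- def calculate_travel_distance(schedule, distancias, cities):
--     # Calcula la distancia total de viaje para todos los equipos en el calendario
--     total_distance = 0
--     for round_matches_dict in schedule:
--         for day, matches_for_day in round_matches_dict.items():
--             for home, away in matches_for_day:
--                 home_city = next(city for city, teams in cities.items() if home in teams)
--                 away_city = next(city for city, teams in cities.items() if away in teams)
--                 distance = distancias[home_city][away_city]
--                 total_distance += distance
--     return total_distance
-- ===== SOURCE B (Python) =====
-- teams = ["Arsenal", "Brentford", "Chelsea", "Crystal Palace", "Fulham", "Tottenham Hotspur", "West Ham United",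
--          "Aston Villa", "Bournemouth", "Brighton", "Burnley", "Liverpool", "Everton", "Luton Town", "Manchester City",
--          "Manchester United", "Newcastle United", "Nottingham Forrest", "Sheffield United", "Wolverhampton Wanderers"]
--
--
-- def evaluate(schedule, cities, distancias):
--     # One streaming pass over the schedule; every penalty is kept in its own
--     # small accumulator and combined at the end.
--     team_city = {}                      # team -> its first listed city
--     for city, cteams in cities.items():
--         for t in cteams:
--             if t not in team_city:
--                 team_city[t] = city
--     multi = [cteams for cteams in cities.values() if len(cteams) > 1]
--
--     hc = {}                             # home appearances per team
--     ac = {}                             # away appearances per team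
--     runs = {}                           # team -> (last side, open run length)
--     pen_runs = 0                        # closed home/away runs: max(0, L - 3) each
--     day_state = (None, 0)               # (last Viernes/Lunes day, open run length)
--     pen_days = 0
--     clash = 0
--     city_miss = 0
--     travel = 0
--     prev = None                         # previous round
--
--     for rnd in schedule:
--         for day, ms in rnd.items():
--             if day in ("Viernes", "Lunes"):
--                 last, L = day_state
--                 if last == day:
--                     day_state = (day, L + 1)
--                 else:
--                     pen_days += max(0, L - 3)
--                     day_state = (day, 1)
--             pms = prev.get(day, []) if prev is not None else []
--             for (h, a), (ph, pa) in zip(ms, pms):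
--                 if h == ph or a == pa:
--                     clash += 1
--             for h, a in ms:
--                 hc[h] = hc.get(h, 0) + 1
--                 ac[a] = ac.get(a, 0) + 1
--                 travel += distancias[team_city[h]][team_city[a]]
--                 for t, side in ((h, "home"), (a, "away")):
--                     last, L = runs.get(t, (None, 0))
--                     if last == side:
--                         runs[t] = (side, L + 1)
--                     else:
--                         pen_runs += max(0, L - 3)
--                         runs[t] = (side, 1)
--         homes = [h for ms in rnd.values() for h, a in ms]
--         for cteams in multi:
--             if not any(h in cteams for h in homes):
--                 city_miss += 1
--         prev = rnd
--
--     pen_days += max(0, day_state[1] - 3)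
--     for t in teams:
--         pen_runs += max(0, runs.get(t, (None, 0))[1] - 3)
--
--     score = clash + city_miss + pen_runs + len(teams) * pen_days + travel
--     half = (len(teams) - 1) // 2
--     for t in teams:
--         nh = hc.get(t, 0)
--         na = ac.get(t, 0)
--         score += abs(nh - na) + abs(nh - half) + abs(na - half)
--     return score
-- ===== Notes on version B (the rewrite author's own statement) =====
-- stated objective: alternative
-- what changed: B replaces A's six separate full traversals of the schedule by ONE streaming pass over the rounds that carries all accumulators at once (previous round for the positional-clash check, home/away count dicts, a keyed run-length state machine charging max(0, L-3) per closed home/away run, a single Viernes/Lunes run machine scaled by len(teams) at the end, per-round city coverage with the multi-team cities precomputed, and travel via a team-to-city dict built up front), combining the penalties only after the pass.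
import Mathlib
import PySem

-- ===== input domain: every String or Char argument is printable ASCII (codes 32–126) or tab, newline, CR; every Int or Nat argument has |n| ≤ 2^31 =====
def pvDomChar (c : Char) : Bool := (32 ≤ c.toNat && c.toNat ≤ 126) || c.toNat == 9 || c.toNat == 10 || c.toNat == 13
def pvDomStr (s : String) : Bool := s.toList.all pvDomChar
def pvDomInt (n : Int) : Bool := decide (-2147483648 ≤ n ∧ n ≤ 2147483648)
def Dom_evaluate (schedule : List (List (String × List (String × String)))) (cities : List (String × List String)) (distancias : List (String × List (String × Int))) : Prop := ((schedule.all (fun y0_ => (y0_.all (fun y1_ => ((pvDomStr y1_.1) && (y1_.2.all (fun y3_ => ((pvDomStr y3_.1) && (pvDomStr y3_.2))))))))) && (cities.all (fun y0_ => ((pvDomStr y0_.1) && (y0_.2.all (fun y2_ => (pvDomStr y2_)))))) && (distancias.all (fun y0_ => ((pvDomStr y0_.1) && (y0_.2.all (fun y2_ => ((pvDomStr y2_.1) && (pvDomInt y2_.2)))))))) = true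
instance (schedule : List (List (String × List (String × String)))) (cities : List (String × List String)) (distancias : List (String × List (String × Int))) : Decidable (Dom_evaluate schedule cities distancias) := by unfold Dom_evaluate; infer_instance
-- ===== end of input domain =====

-- B replaces A's six separate traversals of the schedule by one streaming pass that carries all
-- accumulators at once and combines the penalties only at the end (objective: alternative).

-- the module-level `teams` constant of A's file (shared data, used by both programs)
def teamsList : List String := ["Arsenal", "Brentford", "Chelsea", "Crystal Palace", "Fulham",
  "Tottenham Hotspur", "West Ham United", "Aston Villa", "Bournemouth", "Brighton", "Burnley",
  "Liverpool", "Everton", "Luton Town", "Manchester City", "Manchester United", "Newcastle United",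
  "Nottingham Forrest", "Sheffield United", "Wolverhampton Wanderers"]

-- shared primitive: Python dict access `l[k]` / `l.get(k, dflt)` on an association list (first match)
def pyLookupD {α : Type} (l : List (String × α)) (k : String) (dflt : α) : α :=
  ((l.find? (fun p => p.1 == k)).map (·.2)).getD dflt

-- ===== PORT A =====
def evaluate (schedule : List (List (String × List (String × String)))) (cities : List (String × List String)) (distancias : List (String × List (String × Int))) : Int :=
  -- mtchs[team] = {"home": [...], "away": [...]}  (ported as a pair of lists)
  let matches0 : PySem.Dict String (List String × List String) :=
    teamsList.foldl (fun d t => d.insert t ([], [])) PySem.Dict.empty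
  let mtchs := schedule.foldl (fun m rnd =>
    rnd.foldl (fun m dm =>
      dm.2.foldl (fun m mt =>
        ((m.modify mt.1 ([], []) (fun p => (p.1 ++ [mt.2], p.2))).modify mt.2 ([], [])
          (fun p => (p.1, p.2 ++ [mt.1])))) m) m) matches0
  -- 1. balance terms from mtchs.items()
  let score : Int := mtchs.items.foldl (fun s it =>
    s + |((it.2.1.length : Int) - (it.2.2.length : Int))|
      + |((it.2.1.length : Int) - PySem.Int.floordiv ((teamsList.length : Int) - 1) 2)|
      + |((it.2.2.length : Int) - PySem.Int.floordiv ((teamsList.length : Int) - 1) 2)|) 0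
  -- 2. positional clash between round i and round i-1
  let score := (PySem.List.pyRange 1 (schedule.length : Int) 1).foldl (fun s i =>
    (PySem.List.pyGetD schedule i []).foldl (fun s dm =>
      (List.range dm.2.length).foldl (fun s j =>
        let pms := pyLookupD (PySem.List.pyGetD schedule (i - 1) []) dm.1 []
        if j < pms.length ∧ ((dm.2.getD j ("", "")).1 = (pms.getD j ("", "")).1 ∨
            (dm.2.getD j ("", "")).2 = (pms.getD j ("", "")).2) then s + 1 else s) s) s) score
  -- 3. multi-team cities host every round
  let score := cities.foldl (fun s c =>
    if 1 < c.2.length then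
      schedule.foldl (fun s rnd =>
        let homes := rnd.foldl (fun acc dm =>
          acc ++ (dm.2.filter (fun mt => c.2.contains mt.1)).map (·.1)) ([] : List String)
        if homes.length < 1 then s + 1 else s) s
    else s) score
  -- 4. consecutive home/away per team
  let score := teamsList.foldl (fun s t =>
    (schedule.foldl (fun st rnd =>
      rnd.foldl (fun st dm =>
        dm.2.foldl (fun (st : Option String × Int × Int) mt =>
          if mt.1 = t ∨ mt.2 = t then
            let ha := if mt.1 = t then "home" else "away"
            if st.1 = some ha then
              (some ha, st.2.1 + 1, if st.2.1 + 1 > 2 then st.2.2 + 1 else st.2.2)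
            else (some ha, 0, st.2.2)
          else st) st) st) ((none, 0, s) : Option String × Int × Int)).2.2) score
  -- 5. consecutive Viernes/Lunes, recomputed per team
  let score := teamsList.foldl (fun s _t =>
    (schedule.foldl (fun st rnd =>
      rnd.foldl (fun (st : Option String × Int × Int) dm =>
        if dm.1 = "Viernes" ∨ dm.1 = "Lunes" then
          if st.1 = some dm.1 then
            (some dm.1, st.2.1 + 1, if st.2.1 + 1 > 2 then st.2.2 + 1 else st.2.2)
          else (some dm.1, 0, st.2.2)
        else st) st) ((none, 0, s) : Option String × Int × Int)).2.2) score
  -- travel penalty (first city containing each team, then distancias[hc][ac])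
  let travel := schedule.foldl (fun tot rnd =>
    rnd.foldl (fun tot dm =>
      dm.2.foldl (fun (tot : Int) mt =>
        let hc := ((cities.find? (fun c => c.2.contains mt.1)).map (·.1)).getD ""
        let ac := ((cities.find? (fun c => c.2.contains mt.2)).map (·.1)).getD ""
        tot + pyLookupD (pyLookupD distancias hc []) ac 0) tot) tot) (0 : Int)
  score + travel

-- ===== PORT B =====
-- the per-round updates of Source B's single loop, one named step per accumulator
-- prev round + clash counter ('for (h,a),(ph,pa) in zip(ms, pms): …'; prev := rnd)
def stepClash (p : Option (List (String × List (String × String))) × Int)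
    (rnd : List (String × List (String × String))) :
    Option (List (String × List (String × String))) × Int :=
  (some rnd, rnd.foldl (fun c dm =>
    ((dm.2.zip (match p.1 with | none => [] | some pr => pyLookupD pr dm.1 [])).foldl
      (fun c mp => if mp.1.1 = mp.2.1 ∨ mp.1.2 = mp.2.2 then c + 1 else c) c)) p.2)

-- 'hc[h] = hc.get(h, 0) + 1'
def stepHc (d : PySem.Dict String Int) (rnd : List (String × List (String × String))) : PySem.Dict String Int :=
  rnd.foldl (fun d dm => dm.2.foldl (fun (d : PySem.Dict String Int) mt =>
    d.insert mt.1 (d.getD mt.1 0 + 1)) d) d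

-- 'ac[a] = ac.get(a, 0) + 1'
def stepAc (d : PySem.Dict String Int) (rnd : List (String × List (String × String))) : PySem.Dict String Int :=
  rnd.foldl (fun d dm => dm.2.foldl (fun (d : PySem.Dict String Int) mt =>
    d.insert mt.2 (d.getD mt.2 0 + 1)) d) d

-- one (team, side) event of the run machine: close the open run when the side flips
def kstepD (st : PySem.Dict String (Option String × Int) × Int) (ev : String × String) :
    PySem.Dict String (Option String × Int) × Int :=
  let l := st.1.getD ev.1 (none, 0)
  if l.1 = some ev.2 then (st.1.insert ev.1 (some ev.2, l.2 + 1), st.2)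
  else (st.1.insert ev.1 (some ev.2, 1), st.2 + max 0 (l.2 - 3))

-- 'for t, side in ((h, "home"), (a, "away")): …'
def stepRuns (st : PySem.Dict String (Option String × Int) × Int)
    (rnd : List (String × List (String × String))) : PySem.Dict String (Option String × Int) × Int :=
  rnd.foldl (fun st dm => dm.2.foldl (fun st mt =>
    kstepD (kstepD st (mt.1, "home")) (mt.2, "away")) st) st

-- the Viernes/Lunes day machine ((last day, open run length), closed-run penalty)
def dstep (st : (Option String × Int) × Int) (day : String) : (Option String × Int) × Int :=
  if day = "Viernes" ∨ day = "Lunes" then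
    if st.1.1 = some day then ((some day, st.1.2 + 1), st.2)
    else ((some day, 1), st.2 + max 0 (st.1.2 - 3))
  else st

def stepDays (st : (Option String × Int) × Int) (rnd : List (String × List (String × String))) :
    (Option String × Int) × Int :=
  rnd.foldl (fun st dm => dstep st dm.1) st

-- 'homes = [h for ms in rnd.values() for h, a in ms]; for cteams in multi: …'
def stepCity (multi : List (List String)) (c : Int) (rnd : List (String × List (String × String))) : Int :=
  let homes := rnd.flatMap (fun dm => dm.2.map (·.1))
  multi.foldl (fun c ct => if homes.any (fun h => ct.contains h) then c else c + 1) c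

-- 'travel += distancias[team_city[h]][team_city[a]]'
def stepTravel (tc : PySem.Dict String String) (distancias : List (String × List (String × Int)))
    (tr : Int) (rnd : List (String × List (String × String))) : Int :=
  rnd.foldl (fun tr dm => dm.2.foldl (fun (tr : Int) mt =>
    tr + pyLookupD (pyLookupD distancias (tc.getD mt.1 "") []) (tc.getD mt.2 "") 0) tr) tr

def evaluate_alt (schedule : List (List (String × List (String × String)))) (cities : List (String × List String)) (distancias : List (String × List (String × Int))) : Int :=
  -- team -> its first listed city
  let tc := cities.foldl (fun d c => c.2.foldl (fun (d : PySem.Dict String String) t =>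
    if d.contains t then d else d.insert t c.1) d) PySem.Dict.empty
  let multi := (cities.map (·.2)).filter (fun ct => 1 < ct.length)
  -- the single pass: every accumulator advances one round per iteration
  let st := schedule.foldl (fun st rnd =>
      (stepClash st.1 rnd, stepHc st.2.1 rnd, stepAc st.2.2.1 rnd,
       stepRuns st.2.2.2.1 rnd, stepDays st.2.2.2.2.1 rnd,
       stepCity multi st.2.2.2.2.2.1 rnd, stepTravel tc distancias st.2.2.2.2.2.2 rnd))
    (((none, 0) : Option (List (String × List (String × String))) × Int),
     (PySem.Dict.empty : PySem.Dict String Int), (PySem.Dict.empty : PySem.Dict String Int),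
     ((PySem.Dict.empty : PySem.Dict String (Option String × Int)), (0 : Int)),
     (((none, 0) : Option String × Int), (0 : Int)), (0 : Int), (0 : Int))
  -- flush the open runs, then combine
  let penDays := st.2.2.2.2.1.2 + max 0 (st.2.2.2.2.1.1.2 - 3)
  let penRuns := teamsList.foldl (fun p t => p + max 0 ((st.2.2.2.1.1.getD t (none, 0)).2 - 3)) st.2.2.2.1.2
  let half := PySem.Int.floordiv ((teamsList.length : Int) - 1) 2
  let score := st.1.2 + st.2.2.2.2.2.1 + penRuns + (teamsList.length : Int) * penDays + st.2.2.2.2.2.2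
  teamsList.foldl (fun s t =>
    s + |st.2.1.getD t 0 - st.2.2.1.getD t 0| + |st.2.1.getD t 0 - half|
      + |st.2.2.1.getD t 0 - half|) score

-- ===== PRECONDITION & SPEC =====
-- all matches of the schedule, in iteration order (used only by Pre_)
def flatAll (schedule : List (List (String × List (String × String)))) : List (String × String) :=
  schedule.flatMap (fun rnd => rnd.flatMap (fun dm => dm.2))

-- both teams of a match have a (first) city and the distance table has that city pair (else A raises)
def distOk (cities : List (String × List String)) (distancias : List (String × List (String × Int))) (t u : String) : Bool :=
  match cities.find? (fun c => c.2.contains t), cities.find? (fun c => c.2.contains u) with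
  | some ch, some ca =>
    match distancias.find? (fun p => p.1 == ch.1) with
    | some row => ((row.2.find? (fun p => p.1 == ca.1)).isSome : Bool)
    | none => false
  | _, _ => false

-- Pre_ = the inputs where Python A returns: every listed team is one of the 20 known teams (else
-- KeyError), every day key of a round with a match also keys the previous round (else KeyError),
-- and every match has cities and a distance entry (else StopIteration/KeyError). Pre_ additionally
-- excludes schedules containing a self-match (home == away), a degenerate fixture A accepts but on
-- which the home/away streak bookkeeping is unspecified: A records a single 'home' appearance for
-- the team while B records both its home and its away side.
def Pre_evaluate (schedule : List (List (String × List (String × String)))) (cities : List (String × List String)) (distancias : List (String × List (String × Int))) : Prop :=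
  (∀ m ∈ flatAll schedule, m.1 ∈ teamsList ∧ m.2 ∈ teamsList ∧ m.1 ≠ m.2) ∧
  (∀ pc ∈ schedule.zip schedule.tail, ∀ dm ∈ pc.2, dm.2 ≠ [] → dm.1 ∈ pc.1.map Prod.fst) ∧
  (∀ m ∈ flatAll schedule, distOk cities distancias m.1 m.2 = true)
instance (schedule : List (List (String × List (String × String)))) (cities : List (String × List String)) (distancias : List (String × List (String × Int))) : Decidable (Pre_evaluate schedule cities distancias) := by unfold Pre_evaluate; infer_instance

def pvWitness_evaluate : (List (List (String × List (String × String)))) × (List (String × List String)) × (List (String × List (String × Int))) :=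
  ([[("Viernes", [("Arsenal", "Chelsea")])], [("Viernes", [("Chelsea", "Arsenal")])]],
   [("London", ["Arsenal", "Chelsea"])],
   [("London", [("London", 5)])])

def Spec_evaluate (schedule : List (List (String × List (String × String)))) (cities : List (String × List String)) (distancias : List (String × List (String × Int))) (out : Int) : Prop := out = evaluate_alt schedule cities distancias
instance (schedule : List (List (String × List (String × String)))) (cities : List (String × List String)) (distancias : List (String × List (String × Int))) (out : Int) : Decidable (Spec_evaluate schedule cities distancias out) := by unfold Spec_evaluate; infer_instance

-- ===== CLAIM (what is proved, stated in full; the proofs are below) =====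
def Claim_equal_evaluate : Prop := ∀ (schedule : List (List (String × List (String × String)))) (cities : List (String × List String)) (distancias : List (String × List (String × Int))), Dom_evaluate schedule cities distancias → Pre_evaluate schedule cities distancias → Spec_evaluate schedule cities distancias (evaluate schedule cities distancias)

-- ===== LEMMAS AND PROOFS =====

-- Source B's run penalty in closed form: sum over maximal equal runs of max(0, run_length - 3)
def runPenGo (x : String) (n : Nat) : List String → Int
  | [] => max 0 ((n : Int) - 3)
  | y :: ys => if y = x then runPenGo x (n + 1) ys else max 0 ((n : Int) - 3) + runPenGo y 1 ys

def runPen : List String → Int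
  | [] => 0
  | x :: xs => runPenGo x 1 xs

-- the staged middle form both programs are reduced to (proof-only)
def Mid (schedule : List (List (String × List (String × String)))) (cities : List (String × List String)) (distancias : List (String × List (String × Int))) : Int :=
  let flat := schedule.flatMap (fun rnd => rnd.flatMap (fun dm => dm.2))
  let half := PySem.Int.floordiv ((teamsList.length : Int) - 1) 2
  let cnts := flat.foldl (fun (p : PySem.Dict String Int × PySem.Dict String Int) m =>
      (p.1.insert m.1 (p.1.getD m.1 0 + 1), p.2.insert m.2 (p.2.getD m.2 0 + 1)))
      (PySem.Dict.empty, PySem.Dict.empty)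
  let score : Int := teamsList.foldl (fun s t =>
      let nh := cnts.1.getD t 0
      let na := cnts.2.getD t 0
      s + |nh - na| + |nh - half| + |na - half|) 0
  let score := (schedule.zip schedule.tail).foldl (fun s pc =>
      pc.2.foldl (fun s dm =>
        let pms := pyLookupD pc.1 dm.1 []
        (List.range (min dm.2.length pms.length)).foldl (fun s j =>
          if (dm.2.getD j ("", "")).1 = (pms.getD j ("", "")).1 ∨
              (dm.2.getD j ("", "")).2 = (pms.getD j ("", "")).2 then s + 1 else s) s) s) score
  let score := cities.foldl (fun s c =>
      if 1 < c.2.length then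
        schedule.foldl (fun s rnd =>
          if rnd.any (fun dm => dm.2.any (fun mt => c.2.contains mt.1)) then s else s + 1) s
      else s) score
  let score := teamsList.foldl (fun s t =>
      s + runPen ((flat.filter (fun mt => mt.1 = t ∨ mt.2 = t)).map
        (fun mt => if mt.1 = t then "home" else "away"))) score
  let vl := (schedule.flatMap (fun rnd => rnd.map (·.1))).filter
      (fun d => d = "Viernes" ∨ d = "Lunes")
  let score := score + (teamsList.length : Int) * runPen vl
  let tc := cities.foldl (fun d c =>
      c.2.foldl (fun (d : PySem.Dict String String) t =>
        if d.contains t then d else d.insert t c.1) d) PySem.Dict.empty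
  flat.foldl (fun s m =>
      s + pyLookupD (pyLookupD distancias (tc.getD m.1 "") []) (tc.getD m.2 "") 0) score

-- ---------- generic loop-shape lemmas ----------

theorem nested3_eq_flat {σ : Type} (schedule : List (List (String × List (String × String))))
    (f : σ → (String × String) → σ) (init : σ) :
    schedule.foldl (fun st rnd => rnd.foldl (fun st dm => dm.2.foldl f st) st) init
      = (schedule.flatMap (fun rnd => rnd.flatMap (fun dm => dm.2))).foldl f init := by
  simp only [List.foldl_flatMap]

theorem nested2_eq_flat {σ : Type} (schedule : List (List (String × List (String × String))))
    (f : σ → (String × List (String × String)) → σ) (init : σ) :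
    schedule.foldl (fun st rnd => rnd.foldl f st) init
      = (schedule.flatMap (fun rnd => rnd)).foldl f init := by
  simp only [List.foldl_flatMap]

-- a fold whose step only adds an element-determined increment shifts its initial value out
theorem foldl_delta {α : Type} (step : Int → α → Int) (h : ∀ s x, step s x = s + step 0 x)
    (l : List α) : ∀ s : Int, l.foldl step s = s + l.foldl step 0 := by
  induction l with
  | nil => intro s; simp
  | cons x xs ih =>
    intro s
    rw [List.foldl_cons, List.foldl_cons, ih (step s x), ih (step 0 x), h s x]
    ring

-- a guarded fold is a fold over the filtered, projected list
theorem foldl_guard_map {α σ : Type} (p : α → Prop) [DecidablePred p] (g : α → String)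
    (step : σ → String → σ) (l : List α) :
    ∀ st : σ, l.foldl (fun st x => if p x then step st (g x) else st) st
      = ((l.filter (fun x => decide (p x))).map g).foldl step st := by
  induction l with
  | nil => intro st; rfl
  | cons x xs ih =>
    intro st
    rw [List.foldl_cons, List.filter_cons]
    by_cases hx : p x
    · rw [if_pos hx, if_pos (by simpa using hx), List.map_cons, List.foldl_cons, ih]
    · rw [if_neg hx, if_neg (by simpa using hx), ih]

theorem sum_map_add {α : Type} (l : List α) (f g : α → Int) :
    (l.map (fun x => f x + g x)).sum = (l.map f).sum + (l.map g).sum := by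
  induction l with
  | nil => simp
  | cons x xs ih => simp [ih]; ring

theorem list_sum_comm {α β : Type} (l : List α) (m : List β) (f : α → β → Int) :
    (l.map (fun x => (m.map (f x)).sum)).sum = (m.map (fun y => (l.map (fun x => f x y)).sum)).sum := by
  induction l with
  | nil => simp
  | cons x xs ih =>
    simp only [List.map_cons, List.sum_cons, ih]
    rw [← sum_map_add]

theorem sum_update (l : List String) (hnd : l.Nodup) (t : String) (ht : t ∈ l)
    (f g : String → Int) (hfg : ∀ u, u ≠ t → f u = g u) :
    (l.map f).sum = (l.map g).sum + (f t - g t) := by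
  induction l with
  | nil => cases ht
  | cons x xs ih =>
    rcases List.mem_cons.mp ht with rfl | hmem
    · have : ∀ u ∈ xs, f u = g u := fun u hu =>
        hfg u (fun h => (List.nodup_cons.mp hnd).1 (h ▸ hu))
      simp only [List.map_cons, List.sum_cons]
      rw [List.map_congr_left this]
      ring
    · have hxt : x ≠ t := fun h => (List.nodup_cons.mp hnd).1 (h ▸ hmem)
      simp only [List.map_cons, List.sum_cons]
      rw [ih (List.nodup_cons.mp hnd).2 hmem, hfg x hxt]
      ring

-- ---------- A-side stage lemmas (A = Mid) ----------

-- the shared step of A's two consecutive-run state machines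
def mstep (st : Option String × Int × Int) (ha : String) : Option String × Int × Int :=
  if st.1 = some ha then
    (some ha, st.2.1 + 1, if st.2.1 + 1 > 2 then st.2.2 + 1 else st.2.2)
  else (some ha, 0, st.2.2)

theorem mstep_run (ys : List String) : ∀ (x : String) (k s : Int), 0 ≤ k →
    (ys.foldl mstep (some x, k, s)).2.2 = s + runPenGo x (k.toNat + 1) ys - max 0 (k - 2) := by
  induction ys with
  | nil =>
    intro x k s hk
    simp only [List.foldl_nil, runPenGo]
    have : ((k.toNat + 1 : Nat) : Int) = k + 1 := by omega
    rw [this]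
    rcases le_or_gt k 2 with h | h
    · rw [max_eq_left (by omega), max_eq_left (by omega)]; ring
    · rw [max_eq_right (by omega), max_eq_right (by omega)]; ring
  | cons y ys ih =>
    intro x k s hk
    rw [List.foldl_cons]
    by_cases hyx : y = x
    · subst hyx
      have hstep : mstep (some y, k, s) y = (some y, k + 1, if k + 1 > 2 then s + 1 else s) := by
        simp [mstep]
      rw [hstep, ih y (k + 1) _ (by omega)]
      conv_rhs => rw [runPenGo]
      rw [if_pos rfl]
      have h1 : (k + 1).toNat + 1 = k.toNat + 1 + 1 := by omega
      rw [h1]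
      generalize runPenGo y (k.toNat + 1 + 1) ys = R
      rcases le_or_gt k 1 with h | h
      · rw [if_neg (by omega), max_eq_left (by omega), max_eq_left (by omega)]
      · rw [if_pos (by omega), max_eq_right (by omega), max_eq_right (by omega)]; ring
    · have hstep : mstep (some x, k, s) y = (some y, 0, s) := by
        simp only [mstep]
        rw [if_neg (by simpa using fun h => hyx h.symm)]
      rw [hstep, ih y 0 s le_rfl]
      simp only [runPenGo, if_neg hyx]
      have h1 : ((k.toNat + 1 : Nat) : Int) - 3 = k - 2 := by omega
      have h2 : ((0 : Int).toNat + 1 : Nat) = 1 := by omega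
      rw [h1, h2]
      have : max (0:Int) (0 - 2) = 0 := by omega
      rw [this]
      ring

theorem mstep_runPen (seq : List String) (s : Int) :
    (seq.foldl mstep (none, 0, s)).2.2 = s + runPen seq := by
  cases seq with
  | nil => simp [runPen]
  | cons x xs =>
    rw [List.foldl_cons]
    have hstep : mstep (none, 0, s) x = (some x, 0, s) := by simp [mstep]
    rw [hstep, mstep_run xs x 0 s le_rfl]
    simp [runPen]

-- stage 2 helpers: python range(1, n) ↔ zip with the tail, and the j-range guard ↔ min
theorem pyRange_one_len (n : Nat) :
    PySem.List.pyRange 1 (n : Int) 1 = List.map (fun j : Nat => (j : Int) + 1) (List.range (n - 1)) := by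
  rw [PySem.List.pyRange_of_pos _ _ one_pos]
  rcases Nat.lt_or_ge 1 n with h2 | h2
  · rw [if_pos (by exact_mod_cast h2)]
    have h1 : ((n : Int) - 1 + 1 - 1) / 1 = (n : Int) - 1 := by simp
    rw [h1]
    have : ((n : Int) - 1).toNat = n - 1 := by omega
    rw [this]
    exact List.map_congr_left (fun j hj => by ring)
  · rw [if_neg (by exact_mod_cast Nat.not_lt.mpr h2)]
    have : n - 1 = 0 := by omega
    rw [this]
    simp

theorem foldl_range_guard (n m : Nat) (P : Nat → Prop) [DecidablePred P] (s : Int) :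
    (List.range n).foldl (fun s j => if j < m ∧ P j then s + 1 else s) s
      = (List.range (min n m)).foldl (fun s j => if P j then s + 1 else s) s := by
  rcases Nat.le_total n m with h | h
  · rw [Nat.min_eq_left h]
    apply PySem.List.foldl_congr_mem
    intro acc x hx
    have hxm : x < m := lt_of_lt_of_le (List.mem_range.mp hx) h
    simp [hxm]
  · rw [Nat.min_eq_right h]
    have hn : n = m + (n - m) := by omega
    rw [hn, List.range_add, List.foldl_append]
    have h2 : ∀ (s' : Int), (List.map (fun x => m + x) (List.range (n - m))).foldl
        (fun s j => if j < m ∧ P j then s + 1 else s) s' = s' := by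
      intro s'
      rw [List.foldl_map]
      rw [PySem.List.foldl_congr_mem _ _ (fun a _ => a) _ (by intro acc x hx; simp)]
      exact List.foldl_fixed _
    rw [h2]
    apply PySem.List.foldl_congr_mem
    intro acc x hx
    have hxm : x < m := List.mem_range.mp hx
    simp [hxm]

theorem foldl_zip_tail {α σ : Type} (H : σ → α → α → σ) (d : α) :
    ∀ (l : List α) (s : σ),
    (List.range (l.length - 1)).foldl (fun s j => H s (l.getD j d) (l.getD (j + 1) d)) s
      = (l.zip l.tail).foldl (fun s pc => H s pc.1 pc.2) s := by
  intro l
  induction l with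
  | nil => intro s; simp
  | cons x xs ih =>
    intro s
    cases xs with
    | nil => simp
    | cons y t =>
      have hlen : (x :: y :: t).length - 1 = (y :: t).length - 1 + 1 := by simp
      rw [hlen, List.range_succ_eq_map, List.foldl_cons, List.foldl_map]
      have hzip : ((x :: y :: t).zip (x :: y :: t).tail) = (x, y) :: ((y :: t).zip (y :: t).tail) := by
        simp [List.zip]
      rw [hzip, List.foldl_cons]
      simp only [List.getD_cons_succ, Nat.succ_eq_add_one]
      exact ih _

-- stage 1 helpers
def dictStep (m : PySem.Dict String (List String × List String)) (mt : String × String) :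
    PySem.Dict String (List String × List String) :=
  (m.modify mt.1 ([], []) (fun p => (p.1 ++ [mt.2], p.2))).modify mt.2 ([], [])
    (fun p => (p.1, p.2 ++ [mt.1]))

theorem dictStep_keys (l : List (String × String)) :
    ∀ (d : PySem.Dict String (List String × List String)),
    (∀ m ∈ l, m.1 ∈ d.keys ∧ m.2 ∈ d.keys) → (l.foldl dictStep d).keys = d.keys := by
  induction l with
  | nil => intro d _; rfl
  | cons m l ih =>
    intro d h
    have h1 := (h m (List.mem_cons_self)).1
    have h2 := (h m (List.mem_cons_self)).2
    have hk : (dictStep d m).keys = d.keys := by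
      unfold dictStep
      rw [PySem.Dict.keys_modify, PySem.Dict.keys_insert_of_contains _ _ (by
        rw [PySem.Dict.contains_modify]
        simp [(PySem.Dict.contains_iff_mem_keys d m.2).mpr h2])]
      rw [PySem.Dict.keys_modify, PySem.Dict.keys_insert_of_contains _ _
        ((PySem.Dict.contains_iff_mem_keys _ _).mpr h1)]
    rw [List.foldl_cons, ih (dictStep d m) (by
      intro m' hm'
      rw [hk]
      exact h m' (List.mem_cons_of_mem _ hm')), hk]

theorem dictStep_getD (l : List (String × String)) :
    ∀ (d : PySem.Dict String (List String × List String)) (t : String),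
    (l.foldl dictStep d).getD t ([], [])
      = ((d.getD t ([], [])).1 ++ (l.filter (fun m => m.1 = t)).map (·.2),
         (d.getD t ([], [])).2 ++ (l.filter (fun m => m.2 = t)).map (·.1)) := by
  induction l with
  | nil => intro d t; simp
  | cons m l ih =>
    intro d t
    rw [List.foldl_cons, ih]
    have hg : (dictStep d m).getD t ([], [])
        = ((if m.1 = t then (d.getD t ([], [])).1 ++ [m.2] else (d.getD t ([], [])).1),
           (if m.2 = t then (d.getD t ([], [])).2 ++ [m.1] else (d.getD t ([], [])).2)) := by
      unfold dictStep
      by_cases h1 : t = m.1 <;> by_cases h2 : t = m.2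
      · subst h1; simp [← h2]
      · subst h1
        simp [PySem.Dict.getD_modify, h2]
        exact fun hh => h2 hh.symm
      · subst h2
        simp [PySem.Dict.getD_modify, h1]
        exact fun hh => h1 hh.symm
      · simp [PySem.Dict.getD_modify, h1, h2]
        rw [if_neg (fun hh => h1 hh.symm), if_neg (fun hh => h2 hh.symm)]
    rw [hg]
    by_cases h1 : m.1 = t <;> by_cases h2 : m.2 = t <;>
      simp [h1, h2, List.append_assoc]

theorem const_insert_getD (l : List String) :
    ∀ (d : PySem.Dict String (List String × List String)) (t : String),
    d.getD t ([], []) = ([], []) →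
    (l.foldl (fun d t => d.insert t (([] : List String), ([] : List String))) d).getD t ([], []) = ([], []) := by
  induction l with
  | nil => intro d t h; exact h
  | cons x l ih =>
    intro d t h
    rw [List.foldl_cons]
    exact ih _ t (by rw [PySem.Dict.getD_insert]; split_ifs <;> simp [h])

-- travel helpers: the team→city dict computes the first city containing a team
theorem innerTC (cts : List String) (cy : String) :
    ∀ (d : PySem.Dict String String) (t : String),
    (cts.foldl (fun d u => if d.contains u then d else d.insert u cy) d).get? t
      = if d.contains t then d.get? t else if cts.contains t then some cy else none := by
  induction cts with
  | nil =>
    intro d t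
    simp only [List.foldl_nil, List.contains, List.elem_nil, if_neg Bool.false_ne_true]
    by_cases h : d.contains t = true
    · rw [if_pos h]
    · rw [if_neg h, (PySem.Dict.get?_eq_none_iff_contains _ _).mpr (by simpa using h)]
  | cons u us ih =>
    intro d t
    rw [List.foldl_cons, ih]
    by_cases hu : d.contains u = true
    · rw [if_pos hu]
      by_cases ht : d.contains t = true
      · rw [if_pos ht, if_pos ht]
      · rw [if_neg ht, if_neg ht]
        by_cases htu : t = u
        · subst htu; exact absurd hu (by simpa using ht)
        · have hbe : (t == u) = false := by simpa using htu
          have : (u :: us).contains t = us.contains t := by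
            simp
            exact fun hh => absurd hh htu
          rw [this]
    · rw [if_neg hu]
      by_cases htu : t = u
      · subst htu
        rw [PySem.Dict.contains_insert]
        simp only [BEq.refl, Bool.true_or]
        rw [PySem.Dict.get?_insert_self, if_neg hu]
        simp
      · rw [PySem.Dict.contains_insert]
        have hbe : (t == u) = false := by simpa using htu
        rw [hbe, Bool.false_or]
        by_cases ht : d.contains t = true
        · rw [if_pos ht, if_pos ht, PySem.Dict.get?_insert_of_ne _ _ htu]
        · rw [if_neg ht, if_neg ht]
          have : (u :: us).contains t = us.contains t := by
            simp
            exact fun hh => absurd hh htu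
          rw [this]

theorem outerTC (cs : List (String × List String)) :
    ∀ (d : PySem.Dict String String) (t : String),
    (cs.foldl (fun d c => c.2.foldl (fun (d : PySem.Dict String String) u =>
        if d.contains u then d else d.insert u c.1) d) d).get? t
      = if d.contains t then d.get? t else ((cs.find? (fun c => c.2.contains t)).map (·.1)) := by
  induction cs with
  | nil =>
    intro d t
    by_cases h : d.contains t = true
    · simp [h]
    · simp only [List.foldl_nil, if_neg h, List.find?_nil, Option.map_none]
      exact (PySem.Dict.get?_eq_none_iff_contains _ _).mpr (by simpa using h)
  | cons c cs ih =>
    intro d t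
    rw [List.foldl_cons, ih]
    have hin := innerTC c.2 c.1 d t
    have hcont : (c.2.foldl (fun (d : PySem.Dict String String) u =>
        if d.contains u then d else d.insert u c.1) d).contains t
        = (d.contains t || c.2.contains t) := by
      rw [PySem.Dict.contains_eq_isSome_get?, hin]
      by_cases h1 : d.contains t = true
      · rw [if_pos h1, h1, Bool.true_or, ← PySem.Dict.contains_eq_isSome_get?, h1]
      · have h1f : d.contains t = false := by simpa using h1
        rw [if_neg h1, h1f, Bool.false_or]
        cases h2 : c.2.contains t <;> simp
    by_cases h1 : d.contains t = true
    · rw [hcont, h1, Bool.true_or, if_pos rfl, if_pos rfl, hin, if_pos h1]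
    · have h1f : d.contains t = false := by simpa using h1
      rw [hcont, h1f, Bool.false_or]
      by_cases h2 : c.2.contains t = true
      · rw [h2, if_pos rfl, hin, if_neg h1, if_pos h2,
          if_neg (show ¬(false = true) by simp)]
        have hfind := List.find?_cons_of_pos (l := cs) (a := c) (p := fun x => x.2.contains t) h2
        rw [hfind]
        rfl
      · have h2f : c.2.contains t = false := by simpa using h2
        rw [h2f, if_neg (show ¬(false = true) by simp),
          if_neg (show ¬(false = true) by simp)]
        have hfind := List.find?_cons_of_neg (l := cs) (a := c) (p := fun x => x.2.contains t) h2
        rw [hfind]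

theorem foldl_const_add {α : Type} (l : List α) (K : Int) :
    ∀ s : Int, l.foldl (fun s _ => s + K) s = s + (l.length : Int) * K := by
  induction l with
  | nil => simp
  | cons x xs ih => intro s; simp [List.foldl_cons, ih]; ring

theorem tcGetD (cities : List (String × List String)) (u : String) :
    (cities.foldl (fun d c => c.2.foldl (fun (d : PySem.Dict String String) t =>
        if d.contains t then d else d.insert t c.1) d) PySem.Dict.empty).getD u ""
      = ((cities.find? (fun c => c.2.contains u)).map (·.1)).getD "" := by
  rw [PySem.Dict.getD_eq_get?_getD, outerTC, if_neg (by rw [PySem.Dict.contains_empty]; simp)]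

theorem stageT (cities : List (String × List String)) (distancias : List (String × List (String × Int)))
    (schedule : List (List (String × List (String × String)))) (s : Int) :
    s + schedule.foldl (fun tot rnd =>
      rnd.foldl (fun tot dm =>
        dm.2.foldl (fun (tot : Int) mt =>
          tot + pyLookupD (pyLookupD distancias (((cities.find? (fun c => c.2.contains mt.1)).map (·.1)).getD "") []) (((cities.find? (fun c => c.2.contains mt.2)).map (·.1)).getD "") 0) tot) tot) (0 : Int)
    = (schedule.flatMap (fun rnd => rnd.flatMap (fun dm => dm.2))).foldl (fun s m =>
        s + pyLookupD (pyLookupD distancias ((cities.foldl (fun d c => c.2.foldl (fun (d : PySem.Dict String String) t => if d.contains t then d else d.insert t c.1) d) PySem.Dict.empty).getD m.1 "") []) ((cities.foldl (fun d c => c.2.foldl (fun (d : PySem.Dict String String) t => if d.contains t then d else d.insert t c.1) d) PySem.Dict.empty).getD m.2 "") 0) s := by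
  rw [nested3_eq_flat, PySem.List.foldl_add, PySem.List.foldl_add]
  simp only [tcGetD]
  ring

theorem stage4 (schedule : List (List (String × List (String × String)))) (s : Int) :
    teamsList.foldl (fun s t =>
      (schedule.foldl (fun st rnd =>
        rnd.foldl (fun st dm =>
          dm.2.foldl (fun (st : Option String × Int × Int) mt =>
            if mt.1 = t ∨ mt.2 = t then
              if st.1 = some (if mt.1 = t then "home" else "away") then
                (some (if mt.1 = t then "home" else "away"), st.2.1 + 1, if st.2.1 + 1 > 2 then st.2.2 + 1 else st.2.2)
              else (some (if mt.1 = t then "home" else "away"), 0, st.2.2)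
            else st) st) st) ((none, 0, s) : Option String × Int × Int)).2.2) s
    = teamsList.foldl (fun s t =>
        s + runPen (((schedule.flatMap (fun rnd => rnd.flatMap (fun dm => dm.2))).filter
          (fun mt => mt.1 = t ∨ mt.2 = t)).map
          (fun mt => if mt.1 = t then "home" else "away"))) s := by
  apply PySem.List.foldl_congr_mem
  intro acc t _
  rw [nested3_eq_flat, ← mstep_runPen]
  exact congrArg (fun z : Option String × Int × Int => z.2.2)
    (foldl_guard_map (fun mt : String × String => mt.1 = t ∨ mt.2 = t) (fun mt : String × String => if mt.1 = t then "home" else "away") mstep _ _)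

theorem stage5 (schedule : List (List (String × List (String × String)))) (s : Int) :
    teamsList.foldl (fun s _t =>
      (schedule.foldl (fun st rnd =>
        rnd.foldl (fun (st : Option String × Int × Int) dm =>
          if dm.1 = "Viernes" ∨ dm.1 = "Lunes" then
            if st.1 = some dm.1 then
              (some dm.1, st.2.1 + 1, if st.2.1 + 1 > 2 then st.2.2 + 1 else st.2.2)
            else (some dm.1, 0, st.2.2)
          else st) st) ((none, 0, s) : Option String × Int × Int)).2.2) s
    = s + (teamsList.length : Int) * runPen ((schedule.flatMap (fun rnd => rnd.map (·.1))).filter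
        (fun d => d = "Viernes" ∨ d = "Lunes")) := by
  rw [← foldl_const_add]
  apply PySem.List.foldl_congr_mem
  intro acc _t _
  rw [nested2_eq_flat, ← mstep_runPen]
  have hvl : (schedule.flatMap (fun rnd => rnd.map (·.1))).filter
        (fun d => decide (d = "Viernes" ∨ d = "Lunes"))
      = ((schedule.flatMap (fun rnd => rnd)).filter
          (fun dm => decide (dm.1 = "Viernes" ∨ dm.1 = "Lunes"))).map (·.1) := by
    rw [show (fun rnd : List (String × List (String × String)) => rnd.map (·.1))
        = fun rnd : List (String × List (String × String)) => ((fun r => r) rnd).map (·.1) from rfl]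
    rw [← List.map_flatMap, List.filter_map]
    rfl
  rw [hvl]
  exact congrArg (fun z : Option String × Int × Int => z.2.2)
    (foldl_guard_map (fun dm : String × List (String × String) => dm.1 = "Viernes" ∨ dm.1 = "Lunes")
      (fun dm : String × List (String × String) => dm.1) mstep _ _)

theorem stage3 (cities : List (String × List String)) (schedule : List (List (String × List (String × String)))) (s : Int) :
    cities.foldl (fun s c =>
      if 1 < c.2.length then
        schedule.foldl (fun s rnd =>
          if (rnd.foldl (fun acc dm => acc ++ (dm.2.filter (fun mt => c.2.contains mt.1)).map (·.1)) ([] : List String)).length < 1 then s + 1 else s) s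
      else s) s
    = cities.foldl (fun s c =>
      if 1 < c.2.length then
        schedule.foldl (fun s rnd =>
          if rnd.any (fun dm => dm.2.any (fun mt => c.2.contains mt.1)) then s else s + 1) s
      else s) s := by
  apply PySem.List.foldl_congr_mem
  intro acc c _
  by_cases hc : 1 < c.2.length
  · rw [if_pos hc, if_pos hc]
    apply PySem.List.foldl_congr_mem
    intro acc2 rnd _
    rw [PySem.List.foldl_append_eq_flatMap, List.nil_append]
    by_cases hany : rnd.any (fun dm => dm.2.any (fun mt => c.2.contains mt.1)) = true
    · rw [if_pos hany]
      have hne : (rnd.flatMap fun dm => ((dm.2.filter (fun mt => c.2.contains mt.1)).map (·.1))) ≠ [] := by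
        simp only [List.any_eq_true] at hany
        obtain ⟨dm, hdm, mt, hmt, hcont⟩ := hany
        exact List.ne_nil_of_mem (List.mem_flatMap.mpr ⟨dm, hdm,
          List.mem_map.mpr ⟨mt, List.mem_filter.mpr ⟨hmt, hcont⟩, rfl⟩⟩)
      rw [if_neg (by rw [Nat.lt_one_iff, List.length_eq_zero_iff]; exact hne)]
    · rw [if_neg hany]
      have hnil : (rnd.flatMap fun dm => ((dm.2.filter (fun mt => c.2.contains mt.1)).map (·.1))) = [] := by
        simp only [List.any_eq_true] at hany
        push Not at hany
        refine List.flatMap_eq_nil_iff.mpr (fun dm hdm => ?_)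
        rw [List.map_eq_nil_iff, List.filter_eq_nil_iff]
        intro mt hmt
        simpa using hany dm hdm mt hmt
      rw [if_pos (by rw [Nat.lt_one_iff, List.length_eq_zero_iff]; exact hnil)]
  · rw [if_neg hc, if_neg hc]

theorem stage2 (schedule : List (List (String × List (String × String)))) (s : Int) :
    (PySem.List.pyRange 1 (schedule.length : Int) 1).foldl (fun s i =>
      (PySem.List.pyGetD schedule i []).foldl (fun s dm =>
        (List.range dm.2.length).foldl (fun s j =>
          if j < (pyLookupD (PySem.List.pyGetD schedule (i - 1) []) dm.1 []).length ∧
              ((dm.2.getD j ("", "")).1 = ((pyLookupD (PySem.List.pyGetD schedule (i - 1) []) dm.1 []).getD j ("", "")).1 ∨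
               (dm.2.getD j ("", "")).2 = ((pyLookupD (PySem.List.pyGetD schedule (i - 1) []) dm.1 []).getD j ("", "")).2)
          then s + 1 else s) s) s) s
    = (schedule.zip schedule.tail).foldl (fun s pc =>
        pc.2.foldl (fun s dm =>
          (List.range (min dm.2.length (pyLookupD pc.1 dm.1 []).length)).foldl (fun s j =>
            if (dm.2.getD j ("", "")).1 = ((pyLookupD pc.1 dm.1 []).getD j ("", "")).1 ∨
                (dm.2.getD j ("", "")).2 = ((pyLookupD pc.1 dm.1 []).getD j ("", "")).2
            then s + 1 else s) s) s) s := by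
  rw [pyRange_one_len, List.foldl_map]
  have hcast : ∀ j : Nat, ((j : Int) + 1) = ((j + 1 : Nat) : Int) := by intro j; push_cast; ring
  have hshow : (fun (s : Int) (j : Nat) =>
      (PySem.List.pyGetD schedule ((j : Int) + 1) []).foldl (fun s dm =>
        (List.range dm.2.length).foldl (fun s j' =>
          if j' < (pyLookupD (PySem.List.pyGetD schedule ((j : Int) + 1 - 1) []) dm.1 []).length ∧
              ((dm.2.getD j' ("", "")).1 = ((pyLookupD (PySem.List.pyGetD schedule ((j : Int) + 1 - 1) []) dm.1 []).getD j' ("", "")).1 ∨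
               (dm.2.getD j' ("", "")).2 = ((pyLookupD (PySem.List.pyGetD schedule ((j : Int) + 1 - 1) []) dm.1 []).getD j' ("", "")).2)
          then s + 1 else s) s) s)
      = (fun (s : Int) (j : Nat) =>
        (fun (s : Int) (prev cur : List (String × List (String × String))) =>
          cur.foldl (fun s dm =>
            (List.range dm.2.length).foldl (fun s j' =>
              if j' < (pyLookupD prev dm.1 []).length ∧
                  ((dm.2.getD j' ("", "")).1 = ((pyLookupD prev dm.1 []).getD j' ("", "")).1 ∨
                   (dm.2.getD j' ("", "")).2 = ((pyLookupD prev dm.1 []).getD j' ("", "")).2)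
              then s + 1 else s) s) s) s (schedule.getD j []) (schedule.getD (j + 1) [])) := by
    funext s j
    rw [show ((j : Int) + 1 - 1) = ((j : Nat) : Int) by ring, hcast j,
      PySem.List.pyGetD_natCast, PySem.List.pyGetD_natCast]
  rw [hshow]
  rw [foldl_zip_tail (fun (s : Int) (prev cur : List (String × List (String × String))) =>
      cur.foldl (fun s dm =>
        (List.range dm.2.length).foldl (fun s j' =>
          if j' < (pyLookupD prev dm.1 []).length ∧
              ((dm.2.getD j' ("", "")).1 = ((pyLookupD prev dm.1 []).getD j' ("", "")).1 ∨
               (dm.2.getD j' ("", "")).2 = ((pyLookupD prev dm.1 []).getD j' ("", "")).2)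
          then s + 1 else s) s) s) [] schedule s]
  apply PySem.List.foldl_congr_mem
  intro acc pc _
  apply PySem.List.foldl_congr_mem
  intro acc2 dm _
  exact foldl_range_guard _ _ _ _

theorem getD_count_fst (l : List (String × String)) (t : String) :
    (l.foldl (fun (d : PySem.Dict String Int) m => d.insert m.1 (d.getD m.1 0 + 1)) PySem.Dict.empty).getD t 0
      = ((l.filter (fun m => decide (m.1 = t))).length : Int) := by
  rw [show (fun (d : PySem.Dict String Int) (m : String × String) => d.insert m.1 (d.getD m.1 0 + 1))
      = fun d m => (fun (d : PySem.Dict String Int) (x : String) => d.insert x (d.getD x 0 + 1)) d ((fun (m : String × String) => m.1) m) from rfl]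
  have h := List.foldl_map (f := fun (m : String × String) => m.1)
    (g := fun (d : PySem.Dict String Int) (x : String) => d.insert x (d.getD x 0 + 1))
    (l := l) (init := PySem.Dict.empty)
  rw [← h, PySem.Dict.getD_foldl_insert_add_one, PySem.Dict.getD_empty, zero_add]
  rw [List.count, List.countP_map, ← List.countP_eq_length_filter]
  congr 1

theorem getD_count_snd (l : List (String × String)) (t : String) :
    (l.foldl (fun (d : PySem.Dict String Int) m => d.insert m.2 (d.getD m.2 0 + 1)) PySem.Dict.empty).getD t 0
      = ((l.filter (fun m => decide (m.2 = t))).length : Int) := by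
  rw [show (fun (d : PySem.Dict String Int) (m : String × String) => d.insert m.2 (d.getD m.2 0 + 1))
      = fun d m => (fun (d : PySem.Dict String Int) (x : String) => d.insert x (d.getD x 0 + 1)) d ((fun (m : String × String) => m.2) m) from rfl]
  have h := List.foldl_map (f := fun (m : String × String) => m.2)
    (g := fun (d : PySem.Dict String Int) (x : String) => d.insert x (d.getD x 0 + 1))
    (l := l) (init := PySem.Dict.empty)
  rw [← h, PySem.Dict.getD_foldl_insert_add_one, PySem.Dict.getD_empty, zero_add]
  rw [List.count, List.countP_map, ← List.countP_eq_length_filter]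
  congr 1

theorem stage1 (schedule : List (List (String × List (String × String))))
    (h1 : ∀ m ∈ flatAll schedule, m.1 ∈ teamsList ∧ m.2 ∈ teamsList) :
    ((schedule.foldl (fun m rnd =>
        rnd.foldl (fun m dm =>
          dm.2.foldl (fun m mt =>
            ((m.modify mt.1 ([], []) (fun p => (p.1 ++ [mt.2], p.2))).modify mt.2 ([], [])
              (fun p => (p.1, p.2 ++ [mt.1])))) m) m)
      (teamsList.foldl (fun d t => d.insert t ([], [])) PySem.Dict.empty)).items.foldl (fun s it =>
        s + abs ((it.2.1.length : Int) - (it.2.2.length : Int))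
          + abs ((it.2.1.length : Int) - PySem.Int.floordiv ((teamsList.length : Int) - 1) 2)
          + abs ((it.2.2.length : Int) - PySem.Int.floordiv ((teamsList.length : Int) - 1) 2)) (0 : Int))
    = teamsList.foldl (fun s t =>
        s + abs (((schedule.flatMap (fun rnd => rnd.flatMap (fun dm => dm.2))).foldl (fun (p : PySem.Dict String Int × PySem.Dict String Int) m => (p.1.insert m.1 (p.1.getD m.1 0 + 1), p.2.insert m.2 (p.2.getD m.2 0 + 1))) (PySem.Dict.empty, PySem.Dict.empty)).1.getD t 0 - ((schedule.flatMap (fun rnd => rnd.flatMap (fun dm => dm.2))).foldl (fun (p : PySem.Dict String Int × PySem.Dict String Int) m => (p.1.insert m.1 (p.1.getD m.1 0 + 1), p.2.insert m.2 (p.2.getD m.2 0 + 1))) (PySem.Dict.empty, PySem.Dict.empty)).2.getD t 0)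
          + abs (((schedule.flatMap (fun rnd => rnd.flatMap (fun dm => dm.2))).foldl (fun (p : PySem.Dict String Int × PySem.Dict String Int) m => (p.1.insert m.1 (p.1.getD m.1 0 + 1), p.2.insert m.2 (p.2.getD m.2 0 + 1))) (PySem.Dict.empty, PySem.Dict.empty)).1.getD t 0 - PySem.Int.floordiv ((teamsList.length : Int) - 1) 2)
          + abs (((schedule.flatMap (fun rnd => rnd.flatMap (fun dm => dm.2))).foldl (fun (p : PySem.Dict String Int × PySem.Dict String Int) m => (p.1.insert m.1 (p.1.getD m.1 0 + 1), p.2.insert m.2 (p.2.getD m.2 0 + 1))) (PySem.Dict.empty, PySem.Dict.empty)).2.getD t 0 - PySem.Int.floordiv ((teamsList.length : Int) - 1) 2)) (0 : Int) := by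
  rw [nested3_eq_flat]
  rw [show (fun (m : PySem.Dict String (List String × List String)) (mt : String × String) =>
      ((m.modify mt.1 ([], []) (fun p => (p.1 ++ [mt.2], p.2))).modify mt.2 ([], [])
        (fun p => (p.1, p.2 ++ [mt.1])))) = dictStep from rfl]
  have hp := PySem.List.foldl_prod_mk
    (fun (d : PySem.Dict String Int) (m : String × String) => d.insert m.1 (d.getD m.1 0 + 1))
    (fun (d : PySem.Dict String Int) (m : String × String) => d.insert m.2 (d.getD m.2 0 + 1))
    (schedule.flatMap (fun rnd => rnd.flatMap (fun dm => dm.2))) PySem.Dict.empty PySem.Dict.empty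
  simp only [hp]
  have hm0keys : (teamsList.foldl (fun d t => d.insert t (([] : List String), ([] : List String))) PySem.Dict.empty).keys = teamsList := by rfl
  have hk : ((schedule.flatMap (fun rnd => rnd.flatMap (fun dm => dm.2))).foldl dictStep
      (teamsList.foldl (fun d t => d.insert t ([], [])) PySem.Dict.empty)).keys = teamsList := by
    rw [dictStep_keys _ _ (by intro m hm; rw [hm0keys]; exact h1 m hm)]
    exact hm0keys
  rw [PySem.Dict.items_eq_map_keys _ (by rw [hk]; exact (by decide : teamsList.Nodup)) (([], []) : List String × List String)]
  rw [hk, List.foldl_map]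
  apply PySem.List.foldl_congr_mem
  intro acc t _
  rw [dictStep_getD, const_insert_getD teamsList PySem.Dict.empty t (PySem.Dict.getD_empty _ _)]
  rw [getD_count_fst, getD_count_snd]
  simp [List.length_map]

theorem evaluate_eq_Mid (schedule : List (List (String × List (String × String)))) (cities : List (String × List String)) (distancias : List (String × List (String × Int)))
    (h1 : ∀ m ∈ flatAll schedule, m.1 ∈ teamsList ∧ m.2 ∈ teamsList) :
    evaluate schedule cities distancias = Mid schedule cities distancias := by
  simp only [evaluate, Mid]
  rw [← stageT, stage4, stage5, stage3, stage2, stage1 schedule h1]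

-- ---------- B-side lemmas (evaluate_alt = Mid) ----------

-- the single pass with seven independent accumulators is seven passes
theorem foldl_split7 {α σ1 σ2 σ3 σ4 σ5 σ6 σ7 : Type}
    (f1 : σ1 → α → σ1) (f2 : σ2 → α → σ2) (f3 : σ3 → α → σ3) (f4 : σ4 → α → σ4)
    (f5 : σ5 → α → σ5) (f6 : σ6 → α → σ6) (f7 : σ7 → α → σ7) (l : List α) :
    ∀ (a1 : σ1) (a2 : σ2) (a3 : σ3) (a4 : σ4) (a5 : σ5) (a6 : σ6) (a7 : σ7),
    l.foldl (fun st x => (f1 st.1 x, f2 st.2.1 x, f3 st.2.2.1 x, f4 st.2.2.2.1 x,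
        f5 st.2.2.2.2.1 x, f6 st.2.2.2.2.2.1 x, f7 st.2.2.2.2.2.2 x))
      (a1, a2, a3, a4, a5, a6, a7)
    = (l.foldl f1 a1, l.foldl f2 a2, l.foldl f3 a3, l.foldl f4 a4, l.foldl f5 a5,
       l.foldl f6 a6, l.foldl f7 a7) := by
  induction l with
  | nil => intro a1 a2 a3 a4 a5 a6 a7; rfl
  | cons x xs ih => intro a1 a2 a3 a4 a5 a6 a7; exact ih _ _ _ _ _ _ _

theorem clash_carry (l : List (List (String × List (String × String)))) :
    ∀ (r : List (String × List (String × String))) (c : Int),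
    (l.foldl stepClash (some r, c)).2
      = ((r :: l).zip l).foldl (fun c pc =>
          pc.2.foldl (fun c dm => ((dm.2.zip (pyLookupD pc.1 dm.1 [])).foldl
            (fun c mp => if mp.1.1 = mp.2.1 ∨ mp.1.2 = mp.2.2 then c + 1 else c) c)) c) c := by
  induction l with
  | nil => intro r c; rfl
  | cons rnd l ih =>
    intro r c
    rw [List.foldl_cons]
    have hs : stepClash (some r, c) rnd
        = (some rnd, rnd.foldl (fun c dm => ((dm.2.zip (pyLookupD r dm.1 [])).foldl
            (fun c mp => if mp.1.1 = mp.2.1 ∨ mp.1.2 = mp.2.2 then c + 1 else c) c)) c) := rfl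
    rw [hs, ih]
    rfl

theorem clash_none (l : List (List (String × List (String × String)))) (c : Int) :
    (l.foldl stepClash (none, c)).2
      = (l.zip l.tail).foldl (fun c pc =>
          pc.2.foldl (fun c dm => ((dm.2.zip (pyLookupD pc.1 dm.1 [])).foldl
            (fun c mp => if mp.1.1 = mp.2.1 ∨ mp.1.2 = mp.2.2 then c + 1 else c) c)) c) c := by
  cases l with
  | nil => rfl
  | cons r l =>
    rw [List.foldl_cons]
    have hs : stepClash (none, c) r
        = (some r, r.foldl (fun c dm => ((dm.2.zip ([] : List (String × String))).foldl
            (fun c mp => if mp.1.1 = mp.2.1 ∨ mp.1.2 = mp.2.2 then c + 1 else c) c)) c) := rfl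
    have hid : r.foldl (fun c dm => ((dm.2.zip ([] : List (String × String))).foldl
        (fun c mp => if mp.1.1 = mp.2.1 ∨ mp.1.2 = mp.2.2 then c + 1 else c) c)) c = c := by
      rw [PySem.List.foldl_congr_mem _ _ (fun a _ => a) _
        (by intro acc dm _; rw [List.zip_nil_right]; rfl)]
      exact List.foldl_fixed _
    rw [hs, clash_carry, hid]
    rfl

theorem zipfold_eq_range (ms : List (String × String)) :
    ∀ (pms : List (String × String)) (s : Int),
    (ms.zip pms).foldl (fun c mp => if mp.1.1 = mp.2.1 ∨ mp.1.2 = mp.2.2 then c + 1 else c) s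
      = (List.range (min ms.length pms.length)).foldl (fun s j =>
          if (ms.getD j ("", "")).1 = (pms.getD j ("", "")).1 ∨
              (ms.getD j ("", "")).2 = (pms.getD j ("", "")).2 then s + 1 else s) s := by
  induction ms with
  | nil => intro pms s; simp
  | cons x xs ih =>
    intro pms s
    cases pms with
    | nil => simp
    | cons y ys =>
      have hmin : min (x :: xs).length (y :: ys).length = min xs.length ys.length + 1 := by
        simp [Nat.succ_min_succ]
      rw [hmin, List.range_succ_eq_map, List.foldl_cons, List.foldl_map]
      rw [List.zip_cons_cons, List.foldl_cons, ih]
      simp only [List.getD_cons_zero, List.getD_cons_succ, Nat.succ_eq_add_one]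

-- ---------- the keyed home/away run machine ----------

-- the state part of one run-machine step
def rstep (st : Option String × Int) (side : String) : Option String × Int :=
  if st.1 = some side then (some side, st.2 + 1) else (some side, 1)

-- state + closed-run penalty together
def kstep3 (st : Option String × Int × Int) (side : String) : Option String × Int × Int :=
  if st.1 = some side then (some side, st.2.1 + 1, st.2.2)
  else (some side, 1, st.2.2 + max 0 (st.2.1 - 3))

theorem k3_state (s : List String) : ∀ (st : Option String × Int × Int),
    ((s.foldl kstep3 st).1, (s.foldl kstep3 st).2.1) = s.foldl rstep (st.1, st.2.1) := by
  induction s with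
  | nil => intro st; rfl
  | cons x xs ih =>
    intro st
    rw [List.foldl_cons, List.foldl_cons, ih]
    by_cases h : st.1 = some x
    · simp [kstep3, rstep, h]
    · simp [kstep3, rstep, h]

theorem k3_run (ys : List String) : ∀ (x : String) (L p : Int), 1 ≤ L →
    (ys.foldl kstep3 (some x, L, p)).2.2 + max 0 ((ys.foldl kstep3 (some x, L, p)).2.1 - 3)
      = p + runPenGo x L.toNat ys := by
  induction ys with
  | nil =>
    intro x L p hL
    simp only [List.foldl_nil, runPenGo]
    have : ((L.toNat : Nat) : Int) = L := by omega
    rw [this]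
  | cons y ys ih =>
    intro x L p hL
    rw [List.foldl_cons]
    by_cases hyx : y = x
    · subst hyx
      have hs : kstep3 (some y, L, p) y = (some y, L + 1, p) := by simp [kstep3]
      rw [hs, ih y (L + 1) p (by omega)]
      conv_rhs => rw [runPenGo]
      rw [if_pos rfl]
      have : (L + 1).toNat = L.toNat + 1 := by omega
      rw [this]
    · have hs : kstep3 (some x, L, p) y = (some y, 1, p + max 0 (L - 3)) := by
        simp only [kstep3]
        rw [if_neg (by simpa using fun h => hyx h.symm)]
      rw [hs, ih y 1 _ le_rfl]
      simp only [runPenGo, if_neg hyx]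
      have h1 : ((L.toNat : Nat) : Int) = L := by omega
      have h2 : ((1 : Int).toNat : Nat) = 1 := by omega
      rw [h1, h2]
      ring
-- closed-run penalty plus the open-run flush is exactly Source B's run penalty
theorem k3_runPen (s : List String) :
    (s.foldl kstep3 (none, 0, 0)).2.2 + max 0 ((s.foldl kstep3 (none, 0, 0)).2.1 - 3)
      = runPen s := by
  cases s with
  | nil => simp [runPen]
  | cons x xs =>
    rw [List.foldl_cons]
    have hs : kstep3 (none, 0, 0) x = (some x, 1, 0) := by simp [kstep3]
    rw [hs, k3_run xs x 1 0 le_rfl]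
    simp [runPen]

def cp (s : List String) : Int := (s.foldl kstep3 (none, 0, 0)).2.2

theorem cp_flush (s : List String) :
    cp s + max 0 ((s.foldl rstep (none, 0)).2 - 3) = runPen s := by
  have h := k3_state s (none, 0, 0)
  have h2 : (s.foldl kstep3 (none, 0, 0)).2.1 = (s.foldl rstep (none, 0)).2 :=
    congrArg Prod.snd h
  rw [cp, ← h2, k3_runPen]

theorem cp_snoc (s : List String) (side : String) :
    cp (s ++ [side]) = cp s + (if (s.foldl rstep (none, 0)).1 = some side then 0
      else max 0 ((s.foldl rstep (none, 0)).2 - 3)) := by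
  have h := k3_state s (none, 0, 0)
  have h1 : (s.foldl kstep3 (none, 0, 0)).1 = (s.foldl rstep (none, 0)).1 := congrArg Prod.fst h
  have h2 : (s.foldl kstep3 (none, 0, 0)).2.1 = (s.foldl rstep (none, 0)).2 := congrArg Prod.snd h
  simp only [cp, List.foldl_append, List.foldl_cons, List.foldl_nil]
  by_cases hc : (s.foldl kstep3 (none, 0, 0)).1 = some side
  · rw [h1] at hc
    simp [kstep3, h1, hc]
  · rw [h1] at hc
    simp only [kstep3, h1, if_neg hc, h2]

theorem kstepD_eq (d : PySem.Dict String (Option String × Int)) (p : Int) (ev : String × String) :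
    kstepD (d, p) ev = (d.insert ev.1 (rstep (d.getD ev.1 (none, 0)) ev.2),
      p + (if (d.getD ev.1 (none, 0)).1 = some ev.2 then 0
           else max 0 ((d.getD ev.1 (none, 0)).2 - 3))) := by
  by_cases h : (d.getD ev.1 (none, 0)).1 = some ev.2
  · simp [kstepD, rstep, h]
  · simp [kstepD, rstep, h]

theorem keyed_getD (evs : List (String × String)) :
    ∀ (d : PySem.Dict String (Option String × Int)) (p : Int) (t : String),
    ((evs.foldl kstepD (d, p)).1).getD t (none, 0)
      = ((evs.filter (fun e => decide (e.1 = t))).map (·.2)).foldl rstep (d.getD t (none, 0)) := by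
  induction evs with
  | nil => intro d p t; rfl
  | cons ev evs ih =>
    intro d p t
    rw [List.foldl_cons, kstepD_eq, ih, List.filter_cons]
    by_cases h : ev.1 = t
    · rw [if_pos (by simpa using h), List.map_cons, List.foldl_cons]
      rw [PySem.Dict.getD_insert, if_pos (by rw [h]), h]
    · rw [if_neg (by simpa using h)]
      rw [PySem.Dict.getD_insert, if_neg (fun hh => h hh.symm)]

theorem keyed_pen (evs : List (String × String)) (hk : ∀ ev ∈ evs, ev.1 ∈ teamsList) :
    (evs.foldl kstepD ((PySem.Dict.empty : PySem.Dict String (Option String × Int)), (0 : Int))).2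
      = (teamsList.map (fun t => cp ((evs.filter (fun e => decide (e.1 = t))).map (·.2)))).sum := by
  induction evs using List.reverseRecOn with
  | nil => simp [cp]
  | append_singleton evs ev ih =>
    have hk' : ∀ e ∈ evs, e.1 ∈ teamsList := fun e he => hk e (List.mem_append_left _ he)
    have hev : ev.1 ∈ teamsList := hk ev (List.mem_append_right _ (List.mem_singleton.mpr rfl))
    have hseq : ∀ t, (((evs ++ [ev]).filter (fun e => decide (e.1 = t))).map (·.2))
        = ((evs.filter (fun e => decide (e.1 = t))).map (·.2))
          ++ (if ev.1 = t then [ev.2] else []) := by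
      intro t
      rw [List.filter_append, List.map_append]
      congr 1
      by_cases h : ev.1 = t
      · simp [h]
      · simp [h]
    rw [List.foldl_append, List.foldl_cons, List.foldl_nil,
      ← Prod.mk.eta (p := evs.foldl kstepD (PySem.Dict.empty, 0)), kstepD_eq]
    dsimp only
    rw [ih hk', keyed_getD evs PySem.Dict.empty 0 ev.1, PySem.Dict.getD_empty]
    rw [sum_update teamsList (by decide) ev.1 hev
      (fun t => cp (((evs ++ [ev]).filter (fun e => decide (e.1 = t))).map (·.2)))
      (fun t => cp ((evs.filter (fun e => decide (e.1 = t))).map (·.2)))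
      (by
        intro u hu
        dsimp only
        rw [hseq u, if_neg (fun hh => hu hh.symm), List.append_nil])]
    have hft : cp (((evs ++ [ev]).filter (fun e => decide (e.1 = ev.1))).map (·.2))
        = cp (((evs.filter (fun e => decide (e.1 = ev.1))).map (·.2)) ++ [ev.2]) := by
      rw [hseq ev.1, if_pos rfl]
    rw [hft, cp_snoc]
    ring

-- the (team, side) event stream of a match list, per team, is A's home/away sequence
theorem ev_seq (flat : List (String × String)) (h1 : ∀ m ∈ flat, m.1 ≠ m.2) (t : String) :
    ((flat.flatMap (fun mt => [(mt.1, "home"), (mt.2, "away")])).filter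
        (fun e => decide (e.1 = t))).map (·.2)
      = (flat.filter (fun mt => decide (mt.1 = t ∨ mt.2 = t))).map
          (fun mt => if mt.1 = t then "home" else "away") := by
  induction flat with
  | nil => rfl
  | cons mt rest ih =>
    have hne := h1 mt List.mem_cons_self
    have ihr := ih (fun m hm => h1 m (List.mem_cons_of_mem _ hm))
    rw [List.flatMap_cons, List.filter_append, List.map_append, ihr, List.filter_cons]
    by_cases hm1 : mt.1 = t
    · have hm2 : ¬ mt.2 = t := fun h => hne (hm1.trans h.symm)
      simp [hm1, hm2]
    · by_cases hm2 : mt.2 = t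
      · simp [hm1, hm2]
      · simp [hm1, hm2]

theorem runs_flat (schedule : List (List (String × List (String × String)))) :
    schedule.foldl stepRuns ((PySem.Dict.empty : PySem.Dict String (Option String × Int)), (0 : Int))
      = ((schedule.flatMap (fun rnd => rnd.flatMap (fun dm => dm.2))).flatMap
          (fun mt => [(mt.1, "home"), (mt.2, "away")])).foldl kstepD (PySem.Dict.empty, 0) := by
  rw [show stepRuns = (fun st rnd => rnd.foldl (fun st dm => dm.2.foldl (fun st mt =>
    kstepD (kstepD st (mt.1, "home")) (mt.2, "away")) st) st) from rfl]
  rw [nested3_eq_flat]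
  conv_rhs => rw [List.foldl_flatMap]
  simp only [List.foldl_cons, List.foldl_nil]

theorem runs_eq (flat : List (String × String))
    (h1 : ∀ m ∈ flat, m.1 ∈ teamsList ∧ m.2 ∈ teamsList ∧ m.1 ≠ m.2) :
    teamsList.foldl (fun p t => p + max 0
        ((((flat.flatMap (fun mt => [(mt.1, "home"), (mt.2, "away")])).foldl kstepD
            ((PySem.Dict.empty : PySem.Dict String (Option String × Int)), (0 : Int))).1.getD t (none, 0)).2 - 3))
      ((flat.flatMap (fun mt => [(mt.1, "home"), (mt.2, "away")])).foldl kstepD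
          ((PySem.Dict.empty : PySem.Dict String (Option String × Int)), (0 : Int))).2
    = (teamsList.map (fun t => runPen ((flat.filter (fun mt => mt.1 = t ∨ mt.2 = t)).map
        (fun mt => if mt.1 = t then "home" else "away")))).sum := by
  have hk : ∀ ev ∈ flat.flatMap (fun mt => [(mt.1, "home"), (mt.2, "away")]), ev.1 ∈ teamsList := by
    intro ev hev
    obtain ⟨mt, hmt, hin⟩ := List.mem_flatMap.mp hev
    simp only [List.mem_cons, List.not_mem_nil, or_false] at hin
    rcases hin with h | h
    · rw [h]; exact (h1 mt hmt).1
    · rw [h]; exact (h1 mt hmt).2.1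
  rw [PySem.List.foldl_add, keyed_pen _ hk, ← sum_map_add]
  refine congrArg List.sum (List.map_congr_left (fun t _ => ?_))
  rw [keyed_getD _ PySem.Dict.empty 0 t, PySem.Dict.getD_empty, cp_flush,
    ev_seq flat (fun m hm => (h1 m hm).2.2) t]

-- ---------- the Viernes/Lunes day machine ----------

-- the unguarded day update (the two branches of dstep's inner if)
def ustep (st : (Option String × Int) × Int) (day : String) : (Option String × Int) × Int :=
  if st.1.1 = some day then ((some day, st.1.2 + 1), st.2)
  else ((some day, 1), st.2 + max 0 (st.1.2 - 3))

theorem dstep_guard (st : (Option String × Int) × Int) (day : String) :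
    dstep st day = if day = "Viernes" ∨ day = "Lunes" then ustep st day else st := rfl

theorem ustep_k3 (s : List String) : ∀ (st : Option String × Int × Int),
    s.foldl ustep ((st.1, st.2.1), st.2.2)
      = (((s.foldl kstep3 st).1, (s.foldl kstep3 st).2.1), (s.foldl kstep3 st).2.2) := by
  induction s with
  | nil => intro st; rfl
  | cons x xs ih =>
    intro st
    rw [List.foldl_cons, List.foldl_cons]
    by_cases h : st.1 = some x
    · have h1 : ustep ((st.1, st.2.1), st.2.2) x = ((some x, st.2.1 + 1), st.2.2) := by
        simp [ustep, h]
      have h2 : kstep3 st x = (some x, st.2.1 + 1, st.2.2) := by simp [kstep3, h]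
      rw [h1, h2, ← ih (some x, st.2.1 + 1, st.2.2)]
    · have h1 : ustep ((st.1, st.2.1), st.2.2) x = ((some x, 1), st.2.2 + max 0 (st.2.1 - 3)) := by
        simp [ustep, h]
      have h2 : kstep3 st x = (some x, 1, st.2.2 + max 0 (st.2.1 - 3)) := by simp [kstep3, h]
      rw [h1, h2, ← ih (some x, 1, st.2.2 + max 0 (st.2.1 - 3))]

theorem vl_lists (schedule : List (List (String × List (String × String)))) :
    (schedule.flatMap (fun rnd => rnd.map (·.1))).filter
        (fun d => decide (d = "Viernes" ∨ d = "Lunes"))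
      = ((schedule.flatMap (fun rnd => rnd)).filter
          (fun dm => decide (dm.1 = "Viernes" ∨ dm.1 = "Lunes"))).map (·.1) := by
  rw [show (fun rnd : List (String × List (String × String)) => rnd.map (·.1))
      = fun rnd : List (String × List (String × String)) => ((fun r => r) rnd).map (·.1) from rfl]
  rw [← List.map_flatMap, List.filter_map]
  rfl

theorem days_eq (schedule : List (List (String × List (String × String)))) :
    (schedule.foldl stepDays (((none, 0) : Option String × Int), (0 : Int))).2
        + max 0 ((schedule.foldl stepDays (((none, 0) : Option String × Int), (0 : Int))).1.2 - 3)
      = runPen ((schedule.flatMap (fun rnd => rnd.map (·.1))).filter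
          (fun d => d = "Viernes" ∨ d = "Lunes")) := by
  rw [show stepDays = (fun st rnd => rnd.foldl (fun st dm => dstep st dm.1) st) from rfl]
  rw [nested2_eq_flat]
  simp only [dstep_guard]
  rw [foldl_guard_map (fun dm : String × List (String × String) => dm.1 = "Viernes" ∨ dm.1 = "Lunes")
    (fun dm : String × List (String × String) => dm.1) ustep]
  rw [show (((none, 0) : Option String × Int), (0 : Int))
      = ((((none, 0, 0) : Option String × Int × Int).1, ((none, 0, 0) : Option String × Int × Int).2.1),
         ((none, 0, 0) : Option String × Int × Int).2.2) from rfl]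
  rw [ustep_k3, vl_lists]
  exact k3_runPen _

-- ---------- the city-coverage loop swap ----------

theorem sum_over_filter_map (cities : List (String × List String)) (f : List String → Int) :
    ((((cities.map (·.2)).filter (fun ct => decide (1 < ct.length))).map f)).sum
      = (cities.map (fun c => if 1 < c.2.length then f c.2 else 0)).sum := by
  induction cities with
  | nil => rfl
  | cons c cs ih =>
    rw [List.map_cons, List.filter_cons, List.map_cons, List.sum_cons]
    by_cases h : 1 < c.2.length
    · rw [if_pos (by simpa using h), List.map_cons, List.sum_cons, ih, if_pos h]
    · rw [if_neg (by simpa using h), ih, if_neg h]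
      omega

theorem any_homes (rnd : List (String × List (String × String))) (ct : List String) :
    (rnd.flatMap (fun dm => dm.2.map (·.1))).any (fun h => ct.contains h)
      = rnd.any (fun dm => dm.2.any (fun mt => ct.contains mt.1)) := by
  simp [List.any_flatMap, List.any_map, Function.comp_def]

theorem city_eq (cities : List (String × List String))
    (schedule : List (List (String × List (String × String)))) :
    schedule.foldl (stepCity ((cities.map (·.2)).filter (fun ct => 1 < ct.length))) 0
      = cities.foldl (fun s c =>
          if 1 < c.2.length then
            schedule.foldl (fun s rnd =>
              if rnd.any (fun dm => dm.2.any (fun mt => c.2.contains mt.1)) then s else s + 1) s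
          else s) (0 : Int) := by
  have hB : ∀ (multi : List (List String)) (s : Int)
      (rnd : List (String × List (String × String))),
      stepCity multi s rnd = s + (multi.map (fun ct =>
        if rnd.any (fun dm => dm.2.any (fun mt => ct.contains mt.1)) then 0 else 1)).sum := by
    intro multi s rnd
    simp only [stepCity]
    rw [PySem.List.foldl_congr_mem _ _
      (fun c ct => c + (if rnd.any (fun dm => dm.2.any (fun mt => ct.contains mt.1)) then 0 else 1)) _
      (by
        intro acc ct _
        dsimp only
        rw [any_homes]
        by_cases h2 : (rnd.any fun dm => dm.2.any fun mt => ct.contains mt.1) = true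
        · rw [if_pos h2, if_pos h2]; omega
        · rw [if_neg h2, if_neg h2])]
    rw [PySem.List.foldl_add]
  -- B side: a double sum over rounds and multi-team cities
  rw [PySem.List.foldl_congr_mem _ _
    (fun (s : Int) rnd => s + ((((cities.map (·.2)).filter (fun ct => decide (1 < ct.length))).map
      (fun ct => if rnd.any (fun dm => dm.2.any (fun mt => ct.contains mt.1)) then 0 else 1))).sum) _
    (by intro acc rnd _; exact hB _ _ _)]
  rw [PySem.List.foldl_add]
  -- A side: a double sum over cities and rounds
  rw [PySem.List.foldl_congr_mem _ _
    (fun (s : Int) (c : String × List String) => s + (if 1 < c.2.length then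
      (schedule.map (fun rnd =>
        if rnd.any (fun dm => dm.2.any (fun mt => c.2.contains mt.1)) then 0 else 1)).sum else 0)) _
    (by
      intro acc c _
      dsimp only
      by_cases h : 1 < c.2.length
      · rw [if_pos h, if_pos h]
        rw [PySem.List.foldl_congr_mem _ _
          (fun (s : Int) rnd => s + (if rnd.any (fun dm => dm.2.any (fun mt => c.2.contains mt.1)) then 0 else 1)) _
          (by
            intro a2 rnd _
            dsimp only
            by_cases h2 : (rnd.any fun dm => dm.2.any fun mt => c.2.contains mt.1) = true
            · rw [if_pos h2, if_pos h2]; omega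
            · rw [if_neg h2, if_neg h2])]
        rw [PySem.List.foldl_add]
      · rw [if_neg h, if_neg h]
        omega)]
  rw [PySem.List.foldl_add]
  rw [show (fun (rnd : List (String × List (String × String))) =>
      ((((cities.map (·.2)).filter (fun ct => decide (1 < ct.length))).map
        (fun ct => if rnd.any (fun dm => dm.2.any (fun mt => ct.contains mt.1)) then 0 else 1))).sum)
    = (fun (rnd : List (String × List (String × String))) =>
      (cities.map (fun c => if 1 < c.2.length then
        (if rnd.any (fun dm => dm.2.any (fun mt => c.2.contains mt.1)) then (0 : Int) else 1) else 0)).sum)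
    from funext (fun rnd => sum_over_filter_map cities _)]
  rw [list_sum_comm]
  refine congrArg (fun z => (0 : Int) + z) (congrArg List.sum (List.map_congr_left (fun c _ => ?_)))
  by_cases h : 1 < c.2.length
  · simp only [if_pos h]
  · simp only [if_neg h, List.map_const']
    simp

theorem clash_final (schedule : List (List (String × List (String × String)))) :
    (schedule.foldl stepClash (none, 0)).2
      = (schedule.zip schedule.tail).foldl (fun s pc =>
          pc.2.foldl (fun s dm =>
            (List.range (min dm.2.length (pyLookupD pc.1 dm.1 []).length)).foldl (fun s j =>
              if (dm.2.getD j ("", "")).1 = ((pyLookupD pc.1 dm.1 []).getD j ("", "")).1 ∨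
                  (dm.2.getD j ("", "")).2 = ((pyLookupD pc.1 dm.1 []).getD j ("", "")).2
              then s + 1 else s) s) s) (0 : Int) := by
  rw [clash_none]
  apply PySem.List.foldl_congr_mem
  intro acc pc _
  apply PySem.List.foldl_congr_mem
  intro a2 dm _
  exact zipfold_eq_range _ _ _

theorem hc_flat (schedule : List (List (String × List (String × String)))) :
    schedule.foldl stepHc PySem.Dict.empty
      = (schedule.flatMap (fun rnd => rnd.flatMap (fun dm => dm.2))).foldl
          (fun (d : PySem.Dict String Int) m => d.insert m.1 (d.getD m.1 0 + 1)) PySem.Dict.empty := by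
  rw [show stepHc = (fun d rnd => rnd.foldl (fun d dm => dm.2.foldl (fun (d : PySem.Dict String Int) mt =>
    d.insert mt.1 (d.getD mt.1 0 + 1)) d) d) from rfl]
  rw [nested3_eq_flat]

theorem ac_flat (schedule : List (List (String × List (String × String)))) :
    schedule.foldl stepAc PySem.Dict.empty
      = (schedule.flatMap (fun rnd => rnd.flatMap (fun dm => dm.2))).foldl
          (fun (d : PySem.Dict String Int) m => d.insert m.2 (d.getD m.2 0 + 1)) PySem.Dict.empty := by
  rw [show stepAc = (fun d rnd => rnd.foldl (fun d dm => dm.2.foldl (fun (d : PySem.Dict String Int) mt =>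
    d.insert mt.2 (d.getD mt.2 0 + 1)) d) d) from rfl]
  rw [nested3_eq_flat]

theorem trav_flat (tc : PySem.Dict String String) (distancias : List (String × List (String × Int)))
    (schedule : List (List (String × List (String × String)))) :
    schedule.foldl (stepTravel tc distancias) 0
      = (schedule.flatMap (fun rnd => rnd.flatMap (fun dm => dm.2))).foldl
          (fun (s : Int) m => s + pyLookupD (pyLookupD distancias (tc.getD m.1 "") []) (tc.getD m.2 "") 0) 0 := by
  rw [show stepTravel tc distancias = (fun tr rnd => rnd.foldl (fun tr dm =>
    dm.2.foldl (fun (tr : Int) mt =>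
      tr + pyLookupD (pyLookupD distancias (tc.getD mt.1 "") []) (tc.getD mt.2 "") 0) tr) tr) from rfl]
  rw [nested3_eq_flat]

-- initial-value shift for Mid's threaded stage folds
theorem mid_clash_delta (schedule : List (List (String × List (String × String)))) (s : Int) :
    (schedule.zip schedule.tail).foldl (fun s pc =>
        pc.2.foldl (fun s dm =>
          (List.range (min dm.2.length (pyLookupD pc.1 dm.1 []).length)).foldl (fun s j =>
            if (dm.2.getD j ("", "")).1 = ((pyLookupD pc.1 dm.1 []).getD j ("", "")).1 ∨
                (dm.2.getD j ("", "")).2 = ((pyLookupD pc.1 dm.1 []).getD j ("", "")).2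
            then s + 1 else s) s) s) s
      = s + (schedule.zip schedule.tail).foldl (fun s pc =>
          pc.2.foldl (fun s dm =>
            (List.range (min dm.2.length (pyLookupD pc.1 dm.1 []).length)).foldl (fun s j =>
              if (dm.2.getD j ("", "")).1 = ((pyLookupD pc.1 dm.1 []).getD j ("", "")).1 ∨
                  (dm.2.getD j ("", "")).2 = ((pyLookupD pc.1 dm.1 []).getD j ("", "")).2
              then s + 1 else s) s) s) 0 := by
  refine foldl_delta _ (fun s pc => ?_) _ s
  dsimp only
  have hday : ∀ (s : Int) (dm : String × List (String × String)),
      (List.range (min dm.2.length (pyLookupD pc.1 dm.1 []).length)).foldl (fun s j =>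
        if (dm.2.getD j ("", "")).1 = ((pyLookupD pc.1 dm.1 []).getD j ("", "")).1 ∨
            (dm.2.getD j ("", "")).2 = ((pyLookupD pc.1 dm.1 []).getD j ("", "")).2
        then s + 1 else s) s
      = s + (List.range (min dm.2.length (pyLookupD pc.1 dm.1 []).length)).foldl (fun s j =>
        if (dm.2.getD j ("", "")).1 = ((pyLookupD pc.1 dm.1 []).getD j ("", "")).1 ∨
            (dm.2.getD j ("", "")).2 = ((pyLookupD pc.1 dm.1 []).getD j ("", "")).2
        then s + 1 else s) 0 := by
    intro s dm
    refine foldl_delta _ (fun s j => ?_) _ s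
    dsimp only
    split_ifs <;> omega
  exact foldl_delta _ (fun s dm => hday s dm) _ s

theorem mid_city_delta (cities : List (String × List String))
    (schedule : List (List (String × List (String × String)))) (s : Int) :
    cities.foldl (fun s c =>
        if 1 < c.2.length then
          schedule.foldl (fun s rnd =>
            if rnd.any (fun dm => dm.2.any (fun mt => c.2.contains mt.1)) then s else s + 1) s
        else s) s
      = s + cities.foldl (fun s c =>
          if 1 < c.2.length then
            schedule.foldl (fun s rnd =>
              if rnd.any (fun dm => dm.2.any (fun mt => c.2.contains mt.1)) then s else s + 1) s
          else s) 0 := by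
  refine foldl_delta _ (fun s c => ?_) _ s
  dsimp only
  have hin : ∀ s : Int, schedule.foldl (fun s rnd =>
      if rnd.any (fun dm => dm.2.any (fun mt => c.2.contains mt.1)) then s else s + 1) s
      = s + schedule.foldl (fun s rnd =>
        if rnd.any (fun dm => dm.2.any (fun mt => c.2.contains mt.1)) then s else s + 1) 0 := by
    refine foldl_delta _ (fun s rnd => ?_) _
    dsimp only
    by_cases h2 : (rnd.any fun dm => dm.2.any fun mt => c.2.contains mt.1) = true
    · rw [if_pos h2, if_pos h2]; omega
    · rw [if_neg h2, if_neg h2]; omega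
  by_cases h : 1 < c.2.length
  · rw [if_pos h, if_pos h, hin s]
  · rw [if_neg h, if_neg h]; omega

theorem evaluate_alt_eq_Mid (schedule : List (List (String × List (String × String)))) (cities : List (String × List String)) (distancias : List (String × List (String × Int)))
    (h1 : ∀ m ∈ flatAll schedule, m.1 ∈ teamsList ∧ m.2 ∈ teamsList ∧ m.1 ≠ m.2) :
    evaluate_alt schedule cities distancias = Mid schedule cities distancias := by
  simp only [evaluate_alt, Mid]
  rw [foldl_split7 stepClash stepHc stepAc stepRuns stepDays
    (stepCity ((cities.map (·.2)).filter (fun ct => 1 < ct.length)))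
    (stepTravel (cities.foldl (fun d c => c.2.foldl (fun (d : PySem.Dict String String) t =>
      if d.contains t then d else d.insert t c.1) d) PySem.Dict.empty) distancias) schedule]
  dsimp only
  have h1' : ∀ m ∈ (schedule.flatMap (fun rnd => rnd.flatMap (fun dm => dm.2))),
      m.1 ∈ teamsList ∧ m.2 ∈ teamsList ∧ m.1 ≠ m.2 := h1
  rw [clash_final, hc_flat, ac_flat, runs_flat, runs_eq _ h1', days_eq, city_eq, trav_flat]
  rw [PySem.List.foldl_prod_mk
    (f := fun (d : PySem.Dict String Int) (m : String × String) => d.insert m.1 (d.getD m.1 0 + 1))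
    (g := fun (d : PySem.Dict String Int) (m : String × String) => d.insert m.2 (d.getD m.2 0 + 1))]
  dsimp only
  conv_rhs => rw [PySem.List.foldl_add, PySem.List.foldl_add, mid_city_delta, mid_clash_delta]
  conv_lhs => rw [PySem.List.foldl_add]
  rw [foldl_delta (fun s t =>
      s + |((schedule.flatMap (fun rnd => rnd.flatMap (fun dm => dm.2))).foldl
            (fun (d : PySem.Dict String Int) m => d.insert m.1 (d.getD m.1 0 + 1)) PySem.Dict.empty).getD t 0
          - ((schedule.flatMap (fun rnd => rnd.flatMap (fun dm => dm.2))).foldl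
            (fun (d : PySem.Dict String Int) m => d.insert m.2 (d.getD m.2 0 + 1)) PySem.Dict.empty).getD t 0|
        + |((schedule.flatMap (fun rnd => rnd.flatMap (fun dm => dm.2))).foldl
            (fun (d : PySem.Dict String Int) m => d.insert m.1 (d.getD m.1 0 + 1)) PySem.Dict.empty).getD t 0
          - PySem.Int.floordiv ((teamsList.length : Int) - 1) 2|
        + |((schedule.flatMap (fun rnd => rnd.flatMap (fun dm => dm.2))).foldl
            (fun (d : PySem.Dict String Int) m => d.insert m.2 (d.getD m.2 0 + 1)) PySem.Dict.empty).getD t 0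
          - PySem.Int.floordiv ((teamsList.length : Int) - 1) 2|)
    (by intro s x; dsimp only; ring) teamsList]
  ring

-- ===== VERDICT (by name: the statement is the Claim_ definition above) =====
theorem evaluate_spec : Claim_equal_evaluate := by
  intro schedule cities distancias _hdom hpre
  obtain ⟨h1, _h2, _h3⟩ := hpre
  show evaluate schedule cities distancias = evaluate_alt schedule cities distancias
  rw [evaluate_eq_Mid schedule cities distancias (fun m hm => ⟨(h1 m hm).1, (h1 m hm).2.1⟩),
      evaluate_alt_eq_Mid schedule cities distancias h1]
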